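-- pv_equiv track=rewrite | github.com/ChanghyunRyu/Python-CodingTest-note | recursion_func/vowel_dictionary/vowel_dictionary.py | solution
-- ===== SOURCE A (Python) =====
-- def solution(word):
--     dic = {'A': 0, 'E': 1, 'I': 2, 'O': 3, 'U': 4}
--     answer = 0
--     for i in range(len(word)):
--         num = dic[word[i]]
--         answer += calc_before_word(num, i)
--         answer += 1
--     return answer
--
-- def calc_before_word(n, index):
--     result = 0
--     if n == 0:
--         return result
--     for i in range(5 - index):
--         result += 5**i
--     result *= n
--     return result
-- ===== SOURCE B (Python) =====
-- def solution(word):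
--     dic = {'A': 0, 'E': 1, 'I': 2, 'O': 3, 'U': 4}
--     answer = 0
--     for i, ch in enumerate(word):
--         answer += dic[ch] * ((5 ** (5 - i) - 1) // 4 if i < 5 else 0) + 1
--     return answer
-- ===== Notes on version B (the rewrite author's own statement) =====
-- stated objective: simpler
-- what changed: Replaced A's helper calc_before_word, whose inner loop sums the geometric series 5^0+...+5^(4-i), by the closed-form weight (5**(5-i)-1)//4 applied inline per character (0 for i >= 5), folding the whole computation into one enumerate loop.
-- outside the precondition, e.g. on solution('X'): A raises KeyError, B raises KeyError
import Mathlib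
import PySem

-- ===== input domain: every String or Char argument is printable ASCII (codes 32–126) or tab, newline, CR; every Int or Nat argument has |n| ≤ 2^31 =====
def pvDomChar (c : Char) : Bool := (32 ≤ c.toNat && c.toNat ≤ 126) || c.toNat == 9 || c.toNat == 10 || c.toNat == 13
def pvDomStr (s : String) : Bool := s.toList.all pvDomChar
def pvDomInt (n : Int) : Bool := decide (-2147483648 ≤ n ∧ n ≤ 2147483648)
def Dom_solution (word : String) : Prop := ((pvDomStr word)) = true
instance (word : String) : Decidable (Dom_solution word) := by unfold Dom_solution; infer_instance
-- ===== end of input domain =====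

-- B replaces A's inner geometric-summation loop by the closed-form weight
-- dic[ch] * ((5^(5-i) - 1) // 4) per position (0 for i ≥ 5): simpler, no helper loop.

-- ===== PORT A =====
def pvDicA : PySem.Dict Char Int :=
  (((((PySem.Dict.empty.insert 'A' 0).insert 'E' 1).insert 'I' 2).insert 'O' 3).insert 'U' 4)

-- 5**i: i runs over range(0, 5-index), so i ≥ 0 and ^i.toNat is exact
def calc_before_word (n : Int) (index : Int) : Int :=
  if n = 0 then 0
  else
    let result := (PySem.List.pyRange 0 (5 - index) 1).foldl (fun r i => r + (5:Int) ^ i.toNat) 0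
    result * n

-- word[i]: i runs over range(len(word)), always in range, so pyGetD is exact;
-- dic[word[i]]: Pre_solution excludes the KeyError (get? = none) case, getD 0 never fires inside it
def solution (word : String) : Int :=
  (PySem.List.pyRange 0 (word.toList.length : Int) 1).foldl
    (fun answer i =>
      let num := (pvDicA.get? (PySem.List.pyGetD word.toList i ' ')).getD 0
      answer + calc_before_word num i + 1) 0

-- ===== PORT B =====
def pvDicB : PySem.Dict Char Int :=
  (((((PySem.Dict.empty.insert 'A' 0).insert 'E' 1).insert 'I' 2).insert 'O' 3).insert 'U' 4)

-- dic[ch]: Pre_solution excludes the KeyError (get? = none) case; (5-i).toNat exact since i < 5 in that branch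
def solution_alt (word : String) : Int :=
  (PySem.List.enumerate word.toList 0).foldl
    (fun answer p =>
      answer + ((pvDicB.get? p.2).getD 0) *
        (if p.1 < 5 then PySem.Int.floordiv ((5:Int) ^ (5 - p.1).toNat - 1) 4 else 0) + 1) 0

-- ===== PRECONDITION & SPEC =====
-- Pre_ excludes words containing a non-vowel character: there Python A raises KeyError
def Pre_solution (word : String) : Prop :=
  (word.toList.all (fun c => c ∈ ['A', 'E', 'I', 'O', 'U'])) = true
instance (word : String) : Decidable (Pre_solution word) := by unfold Pre_solution; infer_instance

def pvWitness_solution : String := "UOIEA"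

def Spec_solution (word : String) (out : Int) : Prop := out = solution_alt word
instance (word : String) (out : Int) : Decidable (Spec_solution word out) := by unfold Spec_solution; infer_instance

-- ===== CLAIM (what is proved, stated in full; the proofs are below) =====
def Claim_equal_solution : Prop := ∀ (word : String), Dom_solution word → Pre_solution word → Spec_solution word (solution word)

-- ===== LEMMAS AND PROOFS =====

-- geometric sum: sum_{j<k} 5^j times 4 equals 5^k - 1
theorem pv_geom4 (k : Nat) :
    4 * (List.range k).foldl (fun r j => r + (5:Int) ^ j) 0 = (5:Int) ^ k - 1 := by
  induction k with
  | zero => simp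
  | succ k ih =>
    rw [List.range_succ, List.foldl_append]
    simp only [List.foldl_cons, List.foldl_nil]
    rw [mul_add]
    rw [ih]
    ring

theorem pv_geom (k : Nat) :
    (List.range k).foldl (fun r j => r + (5:Int) ^ j) 0 = ((5:Int) ^ k - 1) / 4 := by
  rw [← pv_geom4 k, Int.mul_ediv_cancel_left _ (by norm_num)]

-- the inner-loop value of A equals B's closed-form weight, for every n and i
theorem pv_calc_eq (n i : Int) :
    calc_before_word n i =
      n * (if i < 5 then PySem.Int.floordiv ((5:Int) ^ (5 - i).toNat - 1) 4 else 0) := by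
  unfold calc_before_word
  by_cases hn : n = 0
  · simp [hn]
  · simp only [if_neg hn]
    by_cases h5 : i < 5
    · rw [if_pos h5, PySem.Int.floordiv_eq_ediv_of_pos (by norm_num)]
      rw [PySem.List.pyRange_one]
      have hcast : ∀ (r : Int) (j : Nat),
          r + (5:Int) ^ ((0 : Int) + (j : Int)).toNat = r + (5:Int) ^ j := by
        intro r j; norm_num
      rw [List.foldl_map]
      simp only [hcast]
      rw [show (5 - i - 0) = (5 - i) by ring, pv_geom ((5 - i).toNat)]
      ring
    · rw [if_neg h5, PySem.List.pyRange_one_eq_nil (by omega)]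
      simp

theorem pv_solution_eq (word : String) : solution word = solution_alt word := by
  unfold solution solution_alt
  rw [PySem.List.enumerate_eq_map_pyRange word.toList ' ', List.foldl_map]
  simp only [PySem.List.len_eq]
  apply PySem.List.foldl_congr_mem
  intro acc i _
  rw [pv_calc_eq _ i]
  rfl

-- ===== VERDICT (by name: the statement is the Claim_ definition above) =====
theorem solution_spec : Claim_equal_solution := by
  intro word _ _
  unfold Spec_solution
  exact pv_solution_eq word
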